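-- pv_equiv track=rewrite | github.com/simingh124/skills | read-paper-pro/scripts/extract_reference_links.py | extract_quoted
-- ===== SOURCE A (Python) =====
-- def extract_quoted(text: str, start: int) -> tuple[str, int]:
--     i = start + 1
--     chars: list[str] = []
--     while i < len(text):
--         ch = text[i]
--         prev = text[i - 1] if i > 0 else ""
--         if ch == '"' and prev != "\\":
--             return "".join(chars), i + 1
--         chars.append(ch)
--         i += 1
--     raise RuntimeError("Unbalanced quoted bibliographic field.")
-- ===== SOURCE B (Python) =====
-- def extract_quoted(text: str, start: int) -> tuple[str, int]:
--     pos = start + 1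
--     while True:
--         j = text.find('"', pos)
--         if j == -1:
--             raise RuntimeError("Unbalanced quoted bibliographic field.")
--         if j == 0 or text[j - 1] != "\\":
--             return text[start + 1 : j], j + 1
--         pos = j + 1
-- ===== Notes on version B (the rewrite author's own statement) =====
-- stated objective: idiomatic
-- what changed: B replaces A's char-by-char while-loop with accumulator list by a str.find jump between quote positions plus a single slice for the result, keeping only a scan position.
-- outside the precondition, e.g. on extract_quoted('ab"', -3): A returns ('b', 0), B returns ('b', 3); on extract_quoted('a\\"', -2): A returns ('', 0), B raises RuntimeError
import Mathlib
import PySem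

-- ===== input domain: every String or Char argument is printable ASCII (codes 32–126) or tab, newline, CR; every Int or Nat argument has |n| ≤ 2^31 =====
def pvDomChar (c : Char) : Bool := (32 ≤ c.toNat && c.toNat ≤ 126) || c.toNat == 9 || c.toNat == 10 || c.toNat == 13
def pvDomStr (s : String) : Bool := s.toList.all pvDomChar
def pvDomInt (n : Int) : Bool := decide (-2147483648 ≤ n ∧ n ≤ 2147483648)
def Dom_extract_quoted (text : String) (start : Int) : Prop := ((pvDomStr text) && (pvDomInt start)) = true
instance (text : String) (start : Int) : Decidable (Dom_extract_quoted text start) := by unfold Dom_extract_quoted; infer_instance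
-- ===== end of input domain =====

-- B scans with str.find jumps between quote positions and slices the result out, instead of
-- A's char-by-char walk with an accumulator list; equality of return values is proved on Pre_.

-- ===== PORT A =====
-- the while-loop of A: state (i, chars); fuel only makes the recursion total (raise paths return a junk value)
def pvALoop (cs : List Char) (fuel : Nat) (i : Int) (chars : List Char) : String × Int :=
  match fuel with
  | 0 => ("", 0)  -- unreachable with the fuel supplied below; loop exit = raise RuntimeError
  | f + 1 =>
    if i < (cs.length : Int) then
      match PySem.List.pyGet? cs i with
      | none => ("", 0)  -- IndexError
      | some ch =>
        let prev : Option Char := if 0 < i then PySem.List.pyGet? cs (i - 1) else none  -- "" as none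
        if ch = '"' ∧ prev ≠ some '\\' then (String.ofList chars, i + 1)  -- "".join(chars)
        else pvALoop cs f (i + 1) (chars ++ [ch])
    else ("", 0)  -- raise RuntimeError

def extract_quoted (text : String) (start : Int) : String × Int :=
  pvALoop text.toList ((((text.toList.length : Int) - (start + 1)).toNat) + 1) (start + 1) []

-- ===== PORT B =====
-- B's while True loop: state pos only; find → escape check on the single previous char → slice
def pvBLoop (cs : List Char) (start : Int) (fuel : Nat) (pos : Int) : String × Int :=
  match fuel with
  | 0 => ("", 0)  -- unreachable with the fuel supplied below
  | f + 1 =>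
    let j := PySem.Chars.findFrom cs ['"'] pos none       -- text.find('"', pos)
    if j = -1 then ("", 0)                                -- raise RuntimeError
    else if j = 0 ∨ PySem.List.pyGet? cs (j - 1) ≠ some '\\' then
      (String.ofList (PySem.List.slice cs (some (start + 1)) (some j)), j + 1)  -- text[start+1:j], j+1
    else pvBLoop cs start f (j + 1)

def extract_quoted_alt (text : String) (start : Int) : String × Int :=
  pvBLoop text.toList start (text.toList.length + 2) (start + 1)

-- ===== PRECONDITION & SPEC =====
-- Pre_ excludes (a) inputs with no unescaped closing quote after start, where A raises RuntimeError
-- (or IndexError), and (b) start < -1, where A's negative text[i] indices wrap around to the end of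
-- the string — an accident of the implementation on which B sometimes raises and otherwise returns
-- a different resume index.
def Pre_extract_quoted (text : String) (start : Int) : Prop :=
  -1 ≤ start ∧ ∃ j < text.toList.length, start + 1 ≤ (j : Int) ∧
    text.toList[j]? = some '"' ∧ (j = 0 ∨ text.toList[j-1]? ≠ some '\\')
instance (text : String) (start : Int) : Decidable (Pre_extract_quoted text start) := by
  unfold Pre_extract_quoted; infer_instance

def pvWitness_extract_quoted : String × Int := ("\"x\"", 0)

def Spec_extract_quoted (text : String) (start : Int) (out : String × Int) : Prop := out = extract_quoted_alt text start
instance (text : String) (start : Int) (out : String × Int) : Decidable (Spec_extract_quoted text start out) := by unfold Spec_extract_quoted; infer_instance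

-- ===== CLAIM (what is proved, stated in full; the proofs are below) =====
def Claim_equal_extract_quoted : Prop := ∀ (text : String) (start : Int), Dom_extract_quoted text start → Pre_extract_quoted text start → Spec_extract_quoted text start (extract_quoted text start)

-- ===== LEMMAS AND PROOFS =====

-- an index carrying an unescaped quote
def pvUQ (cs : List Char) (j : Nat) : Prop :=
  cs[j]? = some '"' ∧ (j = 0 ∨ cs[j-1]? ≠ some '\\')

lemma pv_singleton_prefix_drop {cs : List Char} {a : Char} {i : Nat} :
    [a] <+: cs.drop i ↔ cs[i]? = some a := by
  constructor
  · rintro ⟨t, ht⟩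
    have h0 : (cs.drop i)[0]? = some a := by rw [← ht]; rfl
    simpa [List.getElem?_drop] using h0
  · intro h
    have hi : i < cs.length := (List.getElem?_eq_some_iff.mp h).1
    have hv : cs[i] = a := (List.getElem?_eq_some_iff.mp h).2
    refine ⟨cs.drop (i+1), ?_⟩
    rw [List.drop_eq_getElem_cons hi, hv]
    rfl

lemma pvALoop_eq (cs : List Char) (s j : Nat)
    (hj : j < cs.length) (hq : pvUQ cs j)
    (hmin : ∀ m, s ≤ m → m < j → ¬ pvUQ cs m) :
    ∀ fuel p chars, s ≤ p → p ≤ j → j - p < fuel →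
      pvALoop cs fuel (p : Int) chars
        = (String.ofList (chars ++ (cs.drop p).take (j - p)), (j : Int) + 1) := by
  intro fuel
  induction fuel with
  | zero => intro p chars _ _ h; omega
  | succ f ih =>
    intro p chars hsp hpj hfuel
    have hplen : p < cs.length := by omega
    rw [pvALoop]
    rw [if_pos (by exact_mod_cast hplen)]
    rw [PySem.List.pyGet?_natCast]
    rw [List.getElem?_eq_getElem hplen]
    simp only
    by_cases hpe : p = j
    · subst hpe
      have hcond : cs[p] = '"' ∧
          (if 0 < (p:Int) then PySem.List.pyGet? cs ((p:Int) - 1) else none) ≠ some '\\' := by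
        obtain ⟨h1, h2⟩ := hq
        refine ⟨by simpa [List.getElem?_eq_getElem hplen] using h1, ?_⟩
        by_cases hp0 : p = 0
        · subst hp0
          rw [if_neg (by norm_num)]
          simp
        · have hne : cs[p-1]? ≠ some '\\' := by
            rcases h2 with h0 | hne
            · omega
            · exact hne
          rw [if_pos (show (0:Int) < (p:Int) from by exact_mod_cast Nat.pos_of_ne_zero hp0)]
          rw [show (p : Int) - 1 = ((p - 1 : Nat) : Int) from by omega, PySem.List.pyGet?_natCast]
          exact hne
      rw [if_pos hcond]
      simp
    · have hpj' : p < j := by omega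
      have hncond : ¬ (cs[p] = '"' ∧
          (if 0 < (p:Int) then PySem.List.pyGet? cs ((p:Int) - 1) else none) ≠ some '\\') := by
        intro ⟨h1, h2⟩
        apply hmin p hsp hpj'
        refine ⟨by simp [List.getElem?_eq_getElem hplen, h1], ?_⟩
        rcases Nat.eq_zero_or_pos p with h0 | h0
        · exact Or.inl h0
        · right
          rw [if_pos (by exact_mod_cast h0)] at h2
          have : (p : Int) - 1 = ((p - 1 : Nat) : Int) := by omega
          rw [this, PySem.List.pyGet?_natCast] at h2
          exact h2
      rw [if_neg hncond]
      have hcast : (p : Int) + 1 = ((p + 1 : Nat) : Int) := by push_cast; ring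
      rw [hcast, ih (p+1) (chars ++ [cs[p]]) (by omega) (by omega) (by omega)]
      have hdrop : cs.drop p = cs[p] :: cs.drop (p+1) := List.drop_eq_getElem_cons hplen
      have htake : (cs.drop p).take (j - p) = cs[p] :: (cs.drop (p+1)).take (j - (p+1)) := by
        rw [hdrop]
        have : j - p = (j - (p+1)) + 1 := by omega
        rw [this, List.take_succ_cons]
      rw [htake]
      simp

lemma pvBLoop_eq (cs : List Char) (start : Int) (s j : Nat)
    (hs : (s : Int) = start + 1)
    (hj : j < cs.length) (hq : pvUQ cs j)
    (hmin : ∀ m, s ≤ m → m < j → ¬ pvUQ cs m) :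
    ∀ fuel p, s ≤ p → p ≤ j → j - p < fuel →
      pvBLoop cs start fuel (p : Int)
        = (String.ofList ((cs.drop s).take (j - s)), (j : Int) + 1) := by
  intro fuel
  induction fuel with
  | zero => intro p _ _ h; omega
  | succ f ih =>
    intro p hsp hpj hfuel
    have hplen : p ≤ cs.length := by omega
    rw [pvBLoop]
    -- the find is successful: '"' occurs at index j ≥ p
    have hinf : ['"'] <:+: cs.drop p := by
      have h1 : ['"'] <+: (cs.drop p).drop (j - p) := by
        rw [List.drop_drop, show p + (j - p) = j from by omega]
        exact pv_singleton_prefix_drop.mpr hq.1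
      exact h1.isInfix.trans (List.drop_suffix _ _).isInfix
    have hne : PySem.Chars.findFrom cs ['"'] (p : Int) none ≠ -1 := by
      intro hcontra
      exact (PySem.Chars.findFrom_natCast_eq_neg_one_iff cs ['"'] p hplen).mp hcontra hinf
    obtain ⟨hge, hpref, hmin'⟩ := PySem.Chars.findFrom_natCast_spec cs ['"'] p hplen hne
    set F := PySem.Chars.findFrom cs ['"'] (p : Int) none with hF
    rw [if_neg hne]
    have hF0 : 0 ≤ F := le_trans (by exact_mod_cast Nat.zero_le p) hge
    set q := F.toNat with hqdef
    have hFq : F = (q : Int) := by omega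
    have hqp : p ≤ q := by omega
    have hqquote : cs[q]? = some '"' := pv_singleton_prefix_drop.mp hpref
    have hqj : q ≤ j := by
      by_contra hlt
      exact hmin' j hpj (by omega) (pv_singleton_prefix_drop.mpr hq.1)
    by_cases hqe : q = j
    · subst hqe
      have hcond : F = 0 ∨ PySem.List.pyGet? cs (F - 1) ≠ some '\\' := by
        by_cases hq0 : q = 0
        · left; omega
        · rcases hq.2 with h0 | hne'
          · exact absurd h0 hq0
          · right
            rw [hFq, show (q : Int) - 1 = ((q - 1 : Nat) : Int) from by omega,
              PySem.List.pyGet?_natCast]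
            exact hne'
      rw [if_pos hcond, hFq]
      have hslice : PySem.List.slice cs (some (start + 1)) (some (q : Int))
          = (cs.drop s).take (q - s) := by
        rw [← hs, PySem.List.slice_natCast]
      rw [hslice]
    · have hqlt : q < j := by omega
      have hnU : ¬ pvUQ cs q := hmin q (by omega) hqlt
      have hesc : q ≠ 0 ∧ cs[q-1]? = some '\\' := by
        by_contra hcontra
        apply hnU
        refine ⟨hqquote, ?_⟩
        by_cases h0 : q = 0
        · exact Or.inl h0
        · right; intro habs; exact hcontra ⟨h0, habs⟩
      have hncond : ¬ (F = 0 ∨ PySem.List.pyGet? cs (F - 1) ≠ some '\\') := by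
        rintro (h0 | hne')
        · exact hesc.1 (by omega)
        · apply hne'
          rw [hFq, show (q : Int) - 1 = ((q - 1 : Nat) : Int) from by omega,
            PySem.List.pyGet?_natCast]
          exact hesc.2
      rw [if_neg hncond]
      rw [hFq, show (q : Int) + 1 = ((q + 1 : Nat) : Int) from by push_cast; ring]
      exact ih (q + 1) (by omega) (by omega) (by omega)

-- ===== VERDICT (by name: the statement is the Claim_ definition above) =====
theorem extract_quoted_spec : Claim_equal_extract_quoted := by
  intro text start _hdom hpre
  obtain ⟨hstart, hex⟩ := hpre
  unfold Spec_extract_quoted extract_quoted extract_quoted_alt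
  set cs := text.toList with hcs
  set s : Nat := (start + 1).toNat with hsdef
  have hs : (s : Int) = start + 1 := by omega
  have hexQ : ∃ j, j < cs.length ∧ start + 1 ≤ (j : Int) ∧ pvUQ cs j := by
    obtain ⟨j, hj1, hj2, hj3, hj4⟩ := hex
    exact ⟨j, hj1, hj2, ⟨hj3, hj4⟩⟩
  classical
  set J := Nat.find hexQ with hJ
  have hspec := Nat.find_spec hexQ
  have hjlen : J < cs.length := hspec.1
  have hjU : pvUQ cs J := hspec.2.2
  have hsj : s ≤ J := by have := hspec.2.1; omega
  have hmin : ∀ m, s ≤ m → m < J → ¬ pvUQ cs m := by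
    intro m hsm hmlt hU
    exact Nat.find_min hexQ hmlt ⟨by omega, by omega, hU⟩
  have hA := pvALoop_eq cs s J hjlen hjU hmin
    ((((cs.length : Int) - (start + 1)).toNat) + 1) s []
    (le_refl s) hsj (by omega)
  have hB := pvBLoop_eq cs start s J hs hjlen hjU hmin
    (cs.length + 2) s (le_refl s) hsj (by omega)
  rw [hs] at hA hB
  rw [hA, hB]
  simp
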